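-- pv_equiv track=rewrite | github.com/ericspod/Eidolon | eidolon/mathdef/mesh_utils.py | reindex_mesh
-- ===== SOURCE A (Python) =====
-- def reindex_mesh(inds, components):
--     """
--     Reindex the mesh defined by the topos `inds` and lists of nodes, norms, xis etc. in list `components`. The topos
--     in `inds` will be reordered to start from 0 and any members of `components` not indexed will not be present in the
--     resulting mesh. The return value is the pair (newinds,newcomps) where `newinds` is the new list of topos and
--     `newcomps` the new list of component lists which is indexed by `newinds`.
--     """
--     newcomps = [list() for c in components]
--     newinds = []
--     nodemap = {}
--
--     assert len(components) > 0
--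
--     for ind in inds:
--         newind = []
--         for i in ind:
--             # if the index is new, store it in nodemap and copy over the i'th value from each component to newcomps
--             if i not in nodemap:
--                 nodemap[i] = len(newcomps[0])
--                 for j in range(len(newcomps)):
--                     newcomps[j].append(components[j][i])
--
--             newind.append(nodemap[i])  # replace old index with new index
--
--         newinds.append(tuple(newind))
--
--     return newinds, newcomps
-- ===== SOURCE B (Python) =====
-- def reindex_mesh(inds, components):
--     """
--     Reindex the mesh in three separate passes: (1) collect the distinct indices in
--     order of first appearance into `nodemap` (old index -> new index), (2) gather the
--     used entries of each component by mapping over that order, (3) translate each topo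
--     through `nodemap`.
--     """
--     assert len(components) > 0
--
--     nodemap = {}
--     for ind in inds:
--         for i in ind:
--             if i not in nodemap:
--                 nodemap[i] = len(nodemap)
--
--     order = list(nodemap)
--     newcomps = [[comp[i] for i in order] for comp in components]
--     newinds = [tuple(nodemap[i] for i in ind) for ind in inds]
--     return newinds, newcomps
-- ===== Notes on version B (the rewrite author's own statement) =====
-- stated objective: simpler
-- what changed: A fuses index discovery, component gathering and topo translation into one nested loop with a shared mutable state; B splits them into three independent passes: build the first-appearance nodemap, then gather each component over the key order, then translate each topo through the finished map.
import Mathlib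
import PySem

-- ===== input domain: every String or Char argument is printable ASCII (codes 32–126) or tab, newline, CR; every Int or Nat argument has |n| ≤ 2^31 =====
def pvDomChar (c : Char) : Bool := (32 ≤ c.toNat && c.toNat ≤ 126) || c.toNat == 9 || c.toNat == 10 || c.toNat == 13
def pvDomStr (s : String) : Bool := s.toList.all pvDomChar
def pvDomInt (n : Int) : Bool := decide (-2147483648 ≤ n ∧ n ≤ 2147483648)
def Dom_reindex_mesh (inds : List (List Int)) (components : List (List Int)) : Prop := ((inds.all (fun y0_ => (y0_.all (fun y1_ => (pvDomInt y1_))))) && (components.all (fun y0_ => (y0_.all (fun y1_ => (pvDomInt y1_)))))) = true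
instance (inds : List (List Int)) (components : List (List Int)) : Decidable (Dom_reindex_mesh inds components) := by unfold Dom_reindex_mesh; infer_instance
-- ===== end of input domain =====

-- B re-implements the single fused loop as three separate passes (collect the index
-- order, then gather components, then translate the topos); same cost, simpler shape.

-- ===== PORT A =====
-- body of A's inner 'for i in ind' loop
def aInner (components : List (List Int))
    (s : List Int × List (List Int) × PySem.Dict Int Int) (i : Int) :
    List Int × List (List Int) × PySem.Dict Int Int :=
  if s.2.2.contains i then
    (s.1 ++ [s.2.2.getD i 0], s.2.1, s.2.2)
  else
    -- nodemap[i] = len(newcomps[0]); newcomps[j].append(components[j][i]) for each j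
    let nm' := s.2.2.insert i (((s.2.1.headD []).length : Int))
    let ncs' := (s.2.1.zip components).map (fun p => p.1 ++ [PySem.List.pyGetD p.2 i 0])
    (s.1 ++ [nm'.getD i 0], ncs', nm')

-- body of A's outer 'for ind in inds' loop
def aOuter (components : List (List Int))
    (st : List (List Int) × List (List Int) × PySem.Dict Int Int) (ind : List Int) :
    List (List Int) × List (List Int) × PySem.Dict Int Int :=
  let inner := ind.foldl (aInner components) (([] : List Int), st.2.1, st.2.2)
  (st.1 ++ [inner.1], inner.2.1, inner.2.2)

def reindex_mesh (inds : List (List Int)) (components : List (List Int)) :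
    List (List Int) × List (List Int) :=
  let st := inds.foldl (aOuter components)
    (([] : List (List Int)), components.map (fun _ => ([] : List Int)),
     (PySem.Dict.empty : PySem.Dict Int Int))
  (st.1, st.2.1)

-- ===== PORT B =====
-- body of B's nodemap-building loop: if i not in nodemap: nodemap[i] = len(nodemap)
def bStep (nm : PySem.Dict Int Int) (i : Int) : PySem.Dict Int Int :=
  if nm.contains i then nm else nm.insert i (nm.size : Int)

def reindex_mesh_alt (inds : List (List Int)) (components : List (List Int)) :
    List (List Int) × List (List Int) :=
  let nodemap := inds.foldl (fun nm ind => ind.foldl bStep nm)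
    (PySem.Dict.empty : PySem.Dict Int Int)
  let order := nodemap.keys
  let newcomps := components.map (fun c => order.map (fun i => PySem.List.pyGetD c i 0))
  let newinds := inds.map (fun ind => ind.map (fun i => nodemap.getD i 0))
  (newinds, newcomps)

-- ===== PRECONDITION & SPEC =====
-- Pre_ excludes exactly the inputs where Python A raises: empty `components`
-- (AssertionError) and any topo index out of Python range for some component (IndexError).
def Pre_reindex_mesh (inds : List (List Int)) (components : List (List Int)) : Prop :=
  components ≠ [] ∧
  ∀ ind ∈ inds, ∀ i ∈ ind, ∀ c ∈ components, PySem.Raise.InRange c.length i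
instance (inds : List (List Int)) (components : List (List Int)) :
    Decidable (Pre_reindex_mesh inds components) := by unfold Pre_reindex_mesh; infer_instance

def pvWitness_reindex_mesh : List (List Int) × List (List Int) :=
  ([[0, 2], [2, 1], [2, 2]], [[10, 20, 30], [5, 6, 7]])

def Spec_reindex_mesh (inds : List (List Int)) (components : List (List Int))
    (out : List (List Int) × List (List Int)) : Prop := out = reindex_mesh_alt inds components
instance (inds : List (List Int)) (components : List (List Int))
    (out : List (List Int) × List (List Int)) : Decidable (Spec_reindex_mesh inds components out) := by
  unfold Spec_reindex_mesh; infer_instance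

-- ===== CLAIM (what is proved, stated in full; the proofs are below) =====
def Claim_equal_reindex_mesh : Prop := ∀ (inds : List (List Int)) (components : List (List Int)), Dom_reindex_mesh inds components → Pre_reindex_mesh inds components → Spec_reindex_mesh inds components (reindex_mesh inds components)

-- ===== LEMMAS AND PROOFS =====

-- ordered first-appearance accumulation ("dict.fromkeys" discipline) starting from s
def ddStep (s : List Int) (i : Int) : List Int := if i ∈ s then s else s ++ [i]
def dd (s l : List Int) : List Int := l.foldl ddStep s

-- the items list of a nodemap whose keys, in order, are s, valued by position (from off)
def nmItems : List Int → Nat → List (Int × Int)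
  | [], _ => []
  | i :: s, off => (i, (off : Int)) :: nmItems s (off + 1)

def nmOf (s : List Int) : PySem.Dict Int Int := PySem.Dict.mk (nmItems s 0)

-- every component restricted to the index order s
def compsOf (components : List (List Int)) (s : List Int) : List (List Int) :=
  components.map (fun c => s.map (fun i => PySem.List.pyGetD c i 0))

lemma get?_nmItems (i : Int) :
    ∀ (s : List Int) (off : Nat), (PySem.Dict.mk (nmItems s off)).get? i =
      if i ∈ s then some (((off + s.idxOf i : Nat) : Int)) else none := by
  intro s
  induction s with
  | nil => intro off; simp [nmItems, PySem.Dict.get?]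
  | cons a s ih =>
    intro off
    rw [nmItems, PySem.Dict.get?_mk_cons]
    by_cases h : a = i
    · subst h; simp
    · rw [ih (off + 1)]
      by_cases hm : i ∈ s
      · simp [hm, h, Ne.symm h, List.idxOf_cons_ne _ (by simpa using h)]
        omega
      · simp [hm, h, Ne.symm h]

lemma contains_nmOf (s : List Int) (i : Int) : (nmOf s).contains i = decide (i ∈ s) := by
  rw [PySem.Dict.contains_eq_isSome_get?, nmOf, get?_nmItems]
  by_cases h : i ∈ s <;> simp [h]

lemma getD_nmOf (s : List Int) (i : Int) (h : i ∈ s) :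
    (nmOf s).getD i 0 = (s.idxOf i : Int) := by
  rw [PySem.Dict.getD_eq_get?_getD, nmOf, get?_nmItems]
  simp [h]

lemma length_nmItems (s : List Int) : ∀ off, (nmItems s off).length = s.length := by
  induction s with
  | nil => intro off; rfl
  | cons a s ih => intro off; simp [nmItems, ih]

lemma keys_nmOf (s : List Int) : (nmOf s).keys = s := by
  have : ∀ (t : List Int) (off : Nat), (nmItems t off).map (·.1) = t := by
    intro t
    induction t with
    | nil => intro off; rfl
    | cons a t ih => intro off; simp [nmItems, ih]
  simpa [nmOf, PySem.Dict.keys] using this s 0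

lemma nmItems_append (s : List Int) (i : Int) :
    ∀ off, nmItems (s ++ [i]) off = nmItems s off ++ [(i, ((off + s.length : Nat) : Int))] := by
  induction s with
  | nil => intro off; simp [nmItems]
  | cons a s ih => intro off; simp [nmItems, ih (off + 1)]; omega

lemma insert_nmOf (s : List Int) (i : Int) (h : i ∉ s) :
    (nmOf s).insert i ((s.length : Nat) : Int) = nmOf (s ++ [i]) := by
  apply PySem.Dict.ext
  have hc : (nmOf s).contains i = false := by simp [contains_nmOf, h]
  rw [PySem.Dict.items_insert_of_not_contains _ _ hc]
  show (nmItems s 0) ++ [(i, _)] = nmItems (s ++ [i]) 0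
  rw [nmItems_append s i 0]
  norm_num

lemma size_nmOf (s : List Int) : (nmOf s).size = s.length := by
  simp [nmOf, PySem.Dict.size, length_nmItems]

lemma dd_append (s l l' : List Int) : dd s (l ++ l') = dd (dd s l) l' :=
  List.foldl_append

lemma dd_exists_suffix (l : List Int) : ∀ s, ∃ u, dd s l = s ++ u := by
  induction l with
  | nil => intro s; exact ⟨[], by simp [dd]⟩
  | cons a l ih =>
    intro s
    have h1 : dd s (a :: l) = dd (ddStep s a) l := rfl
    rcases ih (ddStep s a) with ⟨u, hu⟩
    by_cases h : a ∈ s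
    · exact ⟨u, by rw [h1, hu]; simp [ddStep, h]⟩
    · exact ⟨a :: u, by rw [h1, hu]; simp [ddStep, h]⟩

lemma mem_dd_left {i : Int} {s : List Int} (l : List Int) (h : i ∈ s) : i ∈ dd s l := by
  rcases dd_exists_suffix l s with ⟨u, hu⟩
  rw [hu]; exact List.mem_append_left _ h

lemma idxOf_dd {i : Int} {s : List Int} (l : List Int) (h : i ∈ s) :
    (dd s l).idxOf i = s.idxOf i := by
  rcases dd_exists_suffix l s with ⟨u, hu⟩
  rw [hu]; exact List.idxOf_append_of_mem h

lemma mem_dd_of_mem {i : Int} {l : List Int} (s : List Int) (h : i ∈ l) : i ∈ dd s l := by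
  induction l generalizing s with
  | nil => cases h
  | cons a l ih =>
    rcases List.mem_cons.mp h with h | h
    · subst h
      have : i ∈ ddStep s i := by by_cases hm : i ∈ s <;> simp [ddStep, hm]
      exact mem_dd_left l this
    · exact ih (ddStep s a) h

-- head length of compsOf: len(newcomps[0]) = len(s) when components ≠ []
lemma headD_compsOf_length (components : List (List Int)) (s : List Int)
    (hc : components ≠ []) : ((compsOf components s).headD []).length = s.length := by
  cases components with
  | nil => exact absurd rfl hc
  | cons c cs => simp [compsOf]

-- appending the i'th entry of each component extends compsOf by one index
lemma compsOf_snoc (components : List (List Int)) (s : List Int) (i : Int) :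
    ((compsOf components s).zip components).map
        (fun p => p.1 ++ [PySem.List.pyGetD p.2 i 0]) = compsOf components (s ++ [i]) := by
  induction components with
  | nil => rfl
  | cons c cs ih => simp [compsOf] at ih ⊢; exact ih

-- A's inner loop, characterised
lemma aInner_foldl (components : List (List Int)) (hc : components ≠ []) :
    ∀ (ind acc s : List Int),
      ind.foldl (aInner components) (acc, compsOf components s, nmOf s)
        = (acc ++ ind.map (fun i => ((dd s ind).idxOf i : Int)),
           compsOf components (dd s ind), nmOf (dd s ind)) := by
  intro ind
  induction ind with
  | nil => intro acc s; simp [dd]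
  | cons i rest ih =>
    intro acc s
    have hdd : dd s (i :: rest) = dd (ddStep s i) rest := rfl
    rw [List.foldl_cons]
    by_cases h : i ∈ s
    · have hstep : aInner components (acc, compsOf components s, nmOf s) i
          = (acc ++ [(s.idxOf i : Int)], compsOf components s, nmOf s) := by
        simp [aInner, contains_nmOf, h, getD_nmOf s i h]
      have hds : ddStep s i = s := by simp [ddStep, h]
      rw [hstep, ih (acc ++ [(s.idxOf i : Int)]) s, hdd, hds]
      have hidx : (dd s rest).idxOf i = s.idxOf i := idxOf_dd rest h
      simp [hidx]
    · have hval : ((compsOf components s).headD []).length = s.length :=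
        headD_compsOf_length components s hc
      have hins := insert_nmOf s i h
      have hstep : aInner components (acc, compsOf components s, nmOf s) i
          = (acc ++ [((s ++ [i]).idxOf i : Int)], compsOf components (s ++ [i]),
             nmOf (s ++ [i])) := by
        simp only [aInner, contains_nmOf, h, decide_false, Bool.false_eq_true, if_false,
          hval, hins, compsOf_snoc]
        rw [getD_nmOf (s ++ [i]) i (by simp)]
      have hds : ddStep s i = s ++ [i] := by simp [ddStep, h]
      rw [hstep, ih _ (s ++ [i]), hdd, hds]
      have hidx : (dd (s ++ [i]) rest).idxOf i = (s ++ [i]).idxOf i :=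
        idxOf_dd rest (by simp)
      simp [hidx]

-- A's outer loop, characterised
lemma aOuter_foldl (components : List (List Int)) (hc : components ≠ []) :
    ∀ (inds : List (List Int)) (acc : List (List Int)) (s : List Int),
      inds.foldl (aOuter components) (acc, compsOf components s, nmOf s)
        = (acc ++ inds.map (fun ind => ind.map
              (fun i => ((dd s (inds.flatMap id)).idxOf i : Int))),
           compsOf components (dd s (inds.flatMap id)),
           nmOf (dd s (inds.flatMap id))) := by
  intro inds
  induction inds with
  | nil => intro acc s; simp [dd]
  | cons ind rest ih =>
    intro acc s
    have hflat : (ind :: rest).flatMap id = ind ++ rest.flatMap id := by simp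
    rw [List.foldl_cons]
    have houter : aOuter components (acc, compsOf components s, nmOf s) ind
        = (acc ++ [ind.map (fun i => ((dd s ind).idxOf i : Int))],
           compsOf components (dd s ind), nmOf (dd s ind)) := by
      simp [aOuter, aInner_foldl components hc ind [] s]
    rw [houter, ih _ (dd s ind), hflat, dd_append]
    have hmapeq : ind.map (fun i => ((dd s ind).idxOf i : Int))
        = ind.map (fun i => ((dd (dd s ind) (rest.flatMap id)).idxOf i : Int)) := by
      apply List.map_congr_left
      intro i hi
      rw [idxOf_dd (rest.flatMap id) (mem_dd_of_mem s hi)]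
    rw [hmapeq]
    simp

-- B's first pass builds exactly nmOf of the first-appearance order
lemma bStep_nmOf (s : List Int) (i : Int) : bStep (nmOf s) i = nmOf (ddStep s i) := by
  by_cases h : i ∈ s
  · simp [bStep, contains_nmOf, h, ddStep]
  · simp only [bStep, contains_nmOf, h, decide_false, Bool.false_eq_true, if_false,
      ddStep, size_nmOf]
    exact insert_nmOf s i h

lemma bFold (l : List Int) : ∀ s, l.foldl bStep (nmOf s) = nmOf (dd s l) := by
  induction l with
  | nil => intro s; simp [dd]
  | cons a l ih => intro s; rw [List.foldl_cons, bStep_nmOf, ih (ddStep s a)]; rfl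

lemma nested_foldl_eq_flat (inds : List (List Int)) :
    ∀ d : PySem.Dict Int Int,
      inds.foldl (fun nm ind => ind.foldl bStep nm) d = (inds.flatMap id).foldl bStep d := by
  induction inds with
  | nil => intro d; rfl
  | cons x xs ih => intro d; simp [List.foldl_append, ih]

lemma nmOf_nil : (PySem.Dict.empty : PySem.Dict Int Int) = nmOf [] := rfl

lemma compsOf_nil (components : List (List Int)) :
    components.map (fun _ => ([] : List Int)) = compsOf components [] := by
  simp [compsOf]

-- ===== VERDICT (by name: the statement is the Claim_ definition above) =====
theorem reindex_mesh_spec : Claim_equal_reindex_mesh := by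
  intro inds components _ hpre
  unfold Spec_reindex_mesh
  obtain ⟨hc, -⟩ := hpre
  simp only [reindex_mesh, reindex_mesh_alt]
  rw [nested_foldl_eq_flat, nmOf_nil, bFold, compsOf_nil, keys_nmOf]
  rw [aOuter_foldl components hc inds [] []]
  refine Prod.ext ?_ rfl
  show inds.map (fun ind => ind.map (fun i => ((dd [] (inds.flatMap id)).idxOf i : Int)))
      = inds.map (fun ind => ind.map (fun i => (nmOf (dd [] (inds.flatMap id))).getD i 0))
  apply List.map_congr_left
  intro ind hind
  apply List.map_congr_left
  intro i hi
  rw [getD_nmOf _ i (mem_dd_of_mem [] (by simpa using List.mem_flatMap.mpr ⟨ind, hind, hi⟩))]
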